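-- pv_equiv track=rewrite | github.com/SwainL/py4interview | binary_search_template.py | findLastElementLessThanKey
-- ===== SOURCE A (Python) =====
-- def findLastElementLessThanKey(arr, key):
--     """
--     查找最后一个小于key的元素
--     :param arr:
--     :param key:
--     :return:
--     """
--     start, end = 0, len(arr) - 1
--     while start <= end:
--         mid = start + (end - start) // 2
--         if arr[mid] >= key:
--             end = mid - 1
--         else:
--             start = mid + 1
--     return end
-- ===== SOURCE B (Python) =====
-- def findLastElementLessThanKey(arr, key):
--     """Recursive binary search: same comparison sequence, different decomposition."""
--     def rec(start, end):
--         if start > end: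
--             return end
--         mid = (start + end) // 2
--         if arr[mid] < key:
--             return rec(mid + 1, end)
--         return rec(start, mid - 1)
--     return rec(0, len(arr) - 1)
-- ===== Notes on version B (the rewrite author's own statement) =====
-- stated objective: alternative
-- what changed: The iterative while-loop binary search is re-decomposed as a recursive helper rec(start, end) with base case start > end returning end, the midpoint computed as (start+end)//2 instead of start+(end-start)//2, and the branch comparison inverted (arr[mid] < key recurses right).
import Mathlib
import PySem

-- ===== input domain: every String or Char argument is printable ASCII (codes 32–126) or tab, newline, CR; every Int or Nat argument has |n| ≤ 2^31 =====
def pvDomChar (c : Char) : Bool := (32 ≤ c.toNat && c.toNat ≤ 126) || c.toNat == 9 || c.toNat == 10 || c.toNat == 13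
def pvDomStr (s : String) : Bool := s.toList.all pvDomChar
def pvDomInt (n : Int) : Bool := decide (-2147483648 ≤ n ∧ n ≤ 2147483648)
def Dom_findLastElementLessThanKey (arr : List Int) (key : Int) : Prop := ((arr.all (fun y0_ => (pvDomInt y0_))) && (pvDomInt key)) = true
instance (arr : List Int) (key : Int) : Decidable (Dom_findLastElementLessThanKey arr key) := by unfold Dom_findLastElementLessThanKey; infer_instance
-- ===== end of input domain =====

-- B replaces A's while-loop by a recursive helper performing the same midpoint comparisons
-- (iterative → recursive decomposition); no speed change claimed.

-- ===== PORT A =====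
-- A's while-loop: state (start, end); arr[mid] is always in range when probed, ported via pyGetD.
def pvLoopA (arr : List Int) (key : Int) (start e : Int) : Int :=
  if _h : start ≤ e then
    let mid := start + PySem.Int.floordiv (e - start) 2
    if PySem.List.pyGetD arr mid 0 ≥ key then
      pvLoopA arr key start (mid - 1)
    else
      pvLoopA arr key (mid + 1) e
  else e
termination_by (e + 1 - start).toNat
decreasing_by
  · have := PySem.Int.floordiv_two_mid_bounds (lo := start) (h := _h) (hi := e)
    have : PySem.Int.floordiv (start + e) 2 = start + PySem.Int.floordiv (e - start) 2 := by
      have h2 : start + e = (e - start) + 2 * start := by ring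
      rw [h2, PySem.Int.floordiv, PySem.Int.floordiv, Int.add_mul_fdiv_left _ _ (by norm_num)]
      ring
    omega
  · have := PySem.Int.floordiv_two_mid_bounds (lo := start) (h := _h) (hi := e)
    have : PySem.Int.floordiv (start + e) 2 = start + PySem.Int.floordiv (e - start) 2 := by
      have h2 : start + e = (e - start) + 2 * start := by ring
      rw [h2, PySem.Int.floordiv, PySem.Int.floordiv, Int.add_mul_fdiv_left _ _ (by norm_num)]
      ring
    omega

def findLastElementLessThanKey (arr : List Int) (key : Int) : Int :=
  pvLoopA arr key 0 ((arr.length : Int) - 1)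

-- ===== PORT B =====
-- B's recursive helper rec(start, end).
def pvRecB (arr : List Int) (key : Int) (start e : Int) : Int :=
  if _h : start > e then e
  else
    let mid := PySem.Int.floordiv (start + e) 2
    if PySem.List.pyGetD arr mid 0 < key then
      pvRecB arr key (mid + 1) e
    else
      pvRecB arr key start (mid - 1)
termination_by (e + 1 - start).toNat
decreasing_by
  · have := PySem.Int.floordiv_two_mid_bounds (lo := start) (h := by omega) (hi := e)
    omega
  · have := PySem.Int.floordiv_two_mid_bounds (lo := start) (h := by omega) (hi := e)
    omega

def findLastElementLessThanKey_alt (arr : List Int) (key : Int) : Int :=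
  pvRecB arr key 0 ((arr.length : Int) - 1)

-- ===== PRECONDITION & SPEC =====
def Spec_findLastElementLessThanKey (arr : List Int) (key : Int) (out : Int) : Prop := out = findLastElementLessThanKey_alt arr key
instance (arr : List Int) (key : Int) (out : Int) : Decidable (Spec_findLastElementLessThanKey arr key out) := by unfold Spec_findLastElementLessThanKey; infer_instance

-- ===== CLAIM (what is proved, stated in full; the proofs are below) =====
def Claim_equal_findLastElementLessThanKey : Prop := ∀ (arr : List Int) (key : Int), Dom_findLastElementLessThanKey arr key → Spec_findLastElementLessThanKey arr key (findLastElementLessThanKey arr key)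

-- ===== LEMMAS AND PROOFS =====

-- A's midpoint start + (e-start)//2 equals B's (start+e)//2.
theorem pv_mid_eq (start e : Int) :
    start + PySem.Int.floordiv (e - start) 2 = PySem.Int.floordiv (start + e) 2 := by
  have h2 : start + e = (e - start) + 2 * start := by ring
  rw [h2, PySem.Int.floordiv, PySem.Int.floordiv, Int.add_mul_fdiv_left _ _ (by norm_num)]
  ring

theorem pvLoopA_eq_pvRecB (arr : List Int) (key : Int) (start e : Int) :
    pvLoopA arr key start e = pvRecB arr key start e := by
  by_cases h : start ≤ e
  · have hb := PySem.Int.floordiv_two_mid_bounds (lo := start) (h := h) (hi := e)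
    rw [pvLoopA, pvRecB]
    simp only [dif_pos h, dif_neg (by omega : ¬ start > e), pv_mid_eq]
    by_cases hc : PySem.List.pyGetD arr (PySem.Int.floordiv (start + e) 2) 0 ≥ key
    · rw [if_pos hc, if_neg (by omega)]
      exact pvLoopA_eq_pvRecB arr key start (PySem.Int.floordiv (start + e) 2 - 1)
    · rw [if_neg hc, if_pos (by omega)]
      exact pvLoopA_eq_pvRecB arr key (PySem.Int.floordiv (start + e) 2 + 1) e
  · rw [pvLoopA, pvRecB, dif_neg h, dif_pos (by omega : start > e)]
termination_by (e + 1 - start).toNat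
decreasing_by
  · have := PySem.Int.floordiv_two_mid_bounds (lo := start) (h := h) (hi := e)
    omega
  · have := PySem.Int.floordiv_two_mid_bounds (lo := start) (h := h) (hi := e)
    omega

-- ===== VERDICT (by name: the statement is the Claim_ definition above) =====
theorem findLastElementLessThanKey_spec : Claim_equal_findLastElementLessThanKey := by
  intro arr key _
  unfold Spec_findLastElementLessThanKey findLastElementLessThanKey findLastElementLessThanKey_alt
  exact pvLoopA_eq_pvRecB arr key 0 ((arr.length : Int) - 1)
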